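-- pv_equiv track=rewrite | github.com/orwithout/noj.nwpu | 31.Number/more/31.solution3 - 副本.py | numberGrid
-- ===== SOURCE A (Python) =====
-- def numberGrid(n):
--     max = (3 * n) // 5 * 5
--     for t in range(max, -1, -5):
--         for a2 in range(n, -1, -1):
--             a3a = min(n, t - a2)
--             for a3 in range(a3a, -1, -1):
--                 if (a2 + a3) % 3 == 0 and (t - a3) % 2 == 0 and (t - a2 - a3) <= n:
--                     return t
-- ===== SOURCE B (Python) =====
-- def numberGrid(n):
--     # Closed form: the answer is periodic with period 15 (f(n+15) = f(n) + 45);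
--     # the deficit 3*n - f(n) depends only on n % 15.
--     _DEFICIT = (0, 3, 1, 4, 2, 5, 3, 6, 4, 2, 5, 3, 6, 4, 2)
--     return 3 * n - _DEFICIT[n % 15]
-- ===== Notes on version B (the rewrite author's own statement) =====
-- stated objective: simpler
-- what changed: Replaced the triple nested search over (t, a2, a3) by a one-line closed form: the feasibility constraints are modular, so the answer is periodic with period fifteen and equals 3*n minus a deficit determined by n's residue class.
-- outside the precondition, e.g. on numberGrid(-1): A returns None, B returns -5
import Mathlib
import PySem

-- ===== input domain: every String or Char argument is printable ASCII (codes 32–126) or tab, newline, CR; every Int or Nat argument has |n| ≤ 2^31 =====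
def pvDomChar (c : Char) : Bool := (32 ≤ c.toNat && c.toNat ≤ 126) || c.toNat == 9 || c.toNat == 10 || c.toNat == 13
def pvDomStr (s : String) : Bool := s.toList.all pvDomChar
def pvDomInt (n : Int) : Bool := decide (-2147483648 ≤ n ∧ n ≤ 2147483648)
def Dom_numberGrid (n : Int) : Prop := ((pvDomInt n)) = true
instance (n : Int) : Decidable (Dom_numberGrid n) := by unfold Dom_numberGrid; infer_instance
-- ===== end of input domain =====

-- B replaces A's triple nested search by a closed form (3*n minus a deficit
-- determined by n % 15); equivalence is proved for all n ≥ 0 (A returns None for n < 0).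


-- ===== PORT A =====
-- the body of the innermost 'if'
def pvCond (n t a2 a3 : Int) : Bool :=
  PySem.Int.mod (a2 + a3) 3 == 0 && PySem.Int.mod (t - a3) 2 == 0 && decide (t - a2 - a3 ≤ n)

-- the two inner 'for' loops, succeeding iff some (a2, a3) triggers 'return t'
def pvInner (n t : Int) : Bool :=
  (PySem.List.pyRange n (-1) (-1)).any (fun a2 =>
    (PySem.List.pyRange (min n (t - a2)) (-1) (-1)).any (fun a3 => pvCond n t a2 a3))

def numberGrid (n : Int) : Int :=
  let mx := PySem.Int.floordiv (3 * n) 5 * 5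
  match (PySem.List.pyRange mx (-1) (-5)).find? (fun t => pvInner n t) with
  | some t => t
  | none => 0   -- Python falls off the end and returns None here (only for n < 0); outside Pre_

-- ===== PORT B =====
def pvTable : List Int := [0, 3, 1, 4, 2, 5, 3, 6, 4, 2, 5, 3, 6, 4, 2]

def numberGrid_alt (n : Int) : Int :=
  -- index n % 15 is always in [0, 15), so the lookup never misses
  3 * n - (PySem.List.pyGet? pvTable (PySem.Int.mod n 15)).getD 0

-- ===== PRECONDITION & SPEC =====
-- Pre_ excludes n < 0, where A's loop body never runs and Python returns None (not an Int).
def Pre_numberGrid (n : Int) : Prop := 0 ≤ n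
instance (n : Int) : Decidable (Pre_numberGrid n) := by unfold Pre_numberGrid; infer_instance
def pvWitness_numberGrid : Int := (7)
def Spec_numberGrid (n : Int) (out : Int) : Prop := out = numberGrid_alt n
instance (n : Int) (out : Int) : Decidable (Spec_numberGrid n out) := by unfold Spec_numberGrid; infer_instance

-- ===== CLAIM (what is proved, stated in full; the proofs are below) =====
def Claim_equal_numberGrid : Prop := ∀ (n : Int), Dom_numberGrid n → Pre_numberGrid n → Spec_numberGrid n (numberGrid n)

-- ===== LEMMAS AND PROOFS =====

-- the deficit 3*n - answer, as a function of n % 15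
def pvT (r : Int) : Int :=
  if r = 0 then 0 else if r = 1 then 3 else if r = 2 then 1 else if r = 3 then 4
  else if r = 4 then 2 else if r = 5 then 5 else if r = 6 then 3 else if r = 7 then 6
  else if r = 8 then 4 else if r = 9 then 2 else if r = 10 then 5 else if r = 11 then 3
  else if r = 12 then 6 else if r = 13 then 4 else 2

lemma alt_eq (n : Int) : numberGrid_alt n = 3 * n - pvT (n % 15) := by
  have hmod : PySem.Int.mod n 15 = n % 15 := PySem.Int.mod_eq_emod_of_pos (by norm_num)
  have h15 : n % 15 = 0 ∨ n % 15 = 1 ∨ n % 15 = 2 ∨ n % 15 = 3 ∨ n % 15 = 4 ∨ n % 15 = 5 ∨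
      n % 15 = 6 ∨ n % 15 = 7 ∨ n % 15 = 8 ∨ n % 15 = 9 ∨ n % 15 = 10 ∨ n % 15 = 11 ∨
      n % 15 = 12 ∨ n % 15 = 13 ∨ n % 15 = 14 := by omega
  rcases h15 with h | h | h | h | h | h | h | h | h | h | h | h | h | h | h <;>
    · rw [show numberGrid_alt n = 3 * n - (PySem.List.pyGet? pvTable (n % 15)).getD 0 from by
        rw [numberGrid_alt, hmod]]
      rw [h]
      norm_num [pvTable, pvT, PySem.List.pyGet?, PySem.List.pyIdx?]
      all_goals decide

lemma mem_down1 (a x : Int) : x ∈ PySem.List.pyRange a (-1) (-1) ↔ 0 ≤ x ∧ x ≤ a := by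
  rw [PySem.List.mem_pyRange_neg_one]; omega

lemma inner_iff (n t : Int) :
    pvInner n t = true ↔ ∃ a2 a3 : Int, 0 ≤ a2 ∧ a2 ≤ n ∧ 0 ≤ a3 ∧ a3 ≤ min n (t - a2) ∧
      (a2 + a3) % 3 = 0 ∧ (t - a3) % 2 = 0 ∧ t - a2 - a3 ≤ n := by
  have hc : ∀ a b : Int, PySem.Int.mod a b = a.fmod b := fun _ _ => rfl
  constructor
  · intro h
    simp only [pvInner, List.any_eq_true, mem_down1] at h
    obtain ⟨a2, ⟨h1, h2⟩, a3, ⟨h3, h4⟩, hcond⟩ := h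
    simp only [pvCond, Bool.and_eq_true, beq_iff_eq,
      PySem.Int.mod_eq_emod_of_pos (show (0:Int) < 3 by norm_num),
      PySem.Int.mod_eq_emod_of_pos (show (0:Int) < 2 by norm_num),
      decide_eq_true_eq] at hcond
    exact ⟨a2, a3, h1, h2, h3, h4, hcond.1.1, hcond.1.2, hcond.2⟩
  · rintro ⟨a2, a3, h1, h2, h3, h4, h5, h6, h7⟩
    simp only [pvInner, List.any_eq_true, mem_down1]
    refine ⟨a2, ⟨h1, h2⟩, a3, ⟨h3, h4⟩, ?_⟩
    simp only [pvCond, Bool.and_eq_true, beq_iff_eq,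
      PySem.Int.mod_eq_emod_of_pos (show (0:Int) < 3 by norm_num),
      PySem.Int.mod_eq_emod_of_pos (show (0:Int) < 2 by norm_num),
      decide_eq_true_eq]
    exact ⟨⟨h5, h6⟩, h7⟩

-- forward: any success of the inner search at a multiple of 5 is bounded by the closed form
lemma inner_fwd (n t : Int) (hn : 0 ≤ n) (ht5 : t % 5 = 0) (h : pvInner n t = true) :
    t ≤ 3 * n - pvT (n % 15) := by
  rw [inner_iff] at h
  obtain ⟨a2, a3, h1, h2, h3, h4, h5, h6, h7⟩ := h
  have h15 : n % 15 = 0 ∨ n % 15 = 1 ∨ n % 15 = 2 ∨ n % 15 = 3 ∨ n % 15 = 4 ∨ n % 15 = 5 ∨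
      n % 15 = 6 ∨ n % 15 = 7 ∨ n % 15 = 8 ∨ n % 15 = 9 ∨ n % 15 = 10 ∨ n % 15 = 11 ∨
      n % 15 = 12 ∨ n % 15 = 13 ∨ n % 15 = 14 := by omega
  rcases h15 with h | h | h | h | h | h | h | h | h | h | h | h | h | h | h <;>
    simp only [pvT, h] <;> norm_num <;>
    · by_contra hcon
      -- the deficit 3*n - t is one of finitely many values; omega finishes each
      have hd : 3 * n - t = 0 ∨ 3 * n - t = 1 ∨ 3 * n - t = 2 ∨ 3 * n - t = 3 ∨
          3 * n - t = 4 ∨ 3 * n - t = 5 := by omega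
      omega

-- backward: the closed-form value itself is found by the inner search
lemma inner_at (n : Int) (hn : 0 ≤ n) : pvInner n (3 * n - pvT (n % 15)) = true := by
  rw [inner_iff]
  have h15 : n % 15 = 0 ∨ n % 15 = 1 ∨ n % 15 = 2 ∨ n % 15 = 3 ∨ n % 15 = 4 ∨ n % 15 = 5 ∨
      n % 15 = 6 ∨ n % 15 = 7 ∨ n % 15 = 8 ∨ n % 15 = 9 ∨ n % 15 = 10 ∨ n % 15 = 11 ∨
      n % 15 = 12 ∨ n % 15 = 13 ∨ n % 15 = 14 := by omega
  -- witnesses (a2, a3) = (n - d2, n - d3), one pair of constants per residue class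
  rcases h15 with h | h | h | h | h | h | h | h | h | h | h | h | h | h | h
  · have hT : pvT (n % 15) = 0 := by rw [h]; norm_num [pvT]
    rw [hT]
    exact ⟨n, n, by omega, by omega, by omega, by omega, by omega, by omega, by omega⟩
  · have hT : pvT (n % 15) = 3 := by rw [h]; norm_num [pvT]
    rw [hT]
    exact ⟨n - 1, n - 1, by omega, by omega, by omega, by omega, by omega, by omega, by omega⟩
  · have hT : pvT (n % 15) = 1 := by rw [h]; norm_num [pvT]
    rw [hT]
    exact ⟨n, n - 1, by omega, by omega, by omega, by omega, by omega, by omega, by omega⟩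
  · have hT : pvT (n % 15) = 4 := by rw [h]; norm_num [pvT]
    rw [hT]
    exact ⟨n - 1, n - 2, by omega, by omega, by omega, by omega, by omega, by omega, by omega⟩
  · have hT : pvT (n % 15) = 2 := by rw [h]; norm_num [pvT]
    rw [hT]
    exact ⟨n, n - 2, by omega, by omega, by omega, by omega, by omega, by omega, by omega⟩
  · have hT : pvT (n % 15) = 5 := by rw [h]; norm_num [pvT]
    rw [hT]
    exact ⟨n, n - 1, by omega, by omega, by omega, by omega, by omega, by omega, by omega⟩
  · have hT : pvT (n % 15) = 3 := by rw [h]; norm_num [pvT]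
    rw [hT]
    exact ⟨n, n - 3, by omega, by omega, by omega, by omega, by omega, by omega, by omega⟩
  · have hT : pvT (n % 15) = 6 := by rw [h]; norm_num [pvT]
    rw [hT]
    exact ⟨n, n - 2, by omega, by omega, by omega, by omega, by omega, by omega, by omega⟩
  · have hT : pvT (n % 15) = 4 := by rw [h]; norm_num [pvT]
    rw [hT]
    exact ⟨n, n - 4, by omega, by omega, by omega, by omega, by omega, by omega, by omega⟩
  · have hT : pvT (n % 15) = 2 := by rw [h]; norm_num [pvT]
    rw [hT]
    exact ⟨n, n, by omega, by omega, by omega, by omega, by omega, by omega, by omega⟩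
  · have hT : pvT (n % 15) = 5 := by rw [h]; norm_num [pvT]
    rw [hT]
    exact ⟨n, n - 5, by omega, by omega, by omega, by omega, by omega, by omega, by omega⟩
  · have hT : pvT (n % 15) = 3 := by rw [h]; norm_num [pvT]
    rw [hT]
    exact ⟨n, n - 1, by omega, by omega, by omega, by omega, by omega, by omega, by omega⟩
  · have hT : pvT (n % 15) = 6 := by rw [h]; norm_num [pvT]
    rw [hT]
    exact ⟨n, n, by omega, by omega, by omega, by omega, by omega, by omega, by omega⟩
  · have hT : pvT (n % 15) = 4 := by rw [h]; norm_num [pvT]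
    rw [hT]
    exact ⟨n, n - 2, by omega, by omega, by omega, by omega, by omega, by omega, by omega⟩
  · have hT : pvT (n % 15) = 2 := by rw [h]; norm_num [pvT]
    rw [hT]
    exact ⟨n - 1, n, by omega, by omega, by omega, by omega, by omega, by omega, by omega⟩

-- unfolding lemma for range(s, -1, -5) with s ≥ 0
lemma down5_cons (s : Int) (hs : 0 ≤ s) :
    PySem.List.pyRange s (-1) (-5) = s :: PySem.List.pyRange (s - 5) (-1) (-5) := by
  simp only [PySem.List.pyRange]
  norm_num
  rw [if_pos (show (-1:Int) < s by omega)]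
  have htail : (if 5 < 1 + s then ((s - 5 + 1 + 5 - 1) / 5).toNat else 0)
      = ((s + 1 + 5 - 1) / 5).toNat - 1 := by split_ifs <;> omega
  have hhead : ((s + 1 + 5 - 1) / 5).toNat = (((s + 1 + 5 - 1) / 5).toNat - 1) + 1 := by omega
  rw [htail, hhead, List.range_succ_eq_map]
  simp only [List.map_cons, List.map_map]
  rw [show (((s + 1 + 5 - 1) / 5).toNat - 1 + 1 - 1) = ((s + 1 + 5 - 1) / 5).toNat - 1 from by omega]
  congr 1
  · norm_num
  · apply List.map_congr_left
    intro k _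
    simp only [Function.comp_apply]
    push_cast
    ring

-- a descending step-5 scan whose predicate holds at f and fails above f returns f
lemma find_down (p : Int → Bool) (f : Int) (hf : 0 ≤ f) (hpf : p f = true)
    (hup : ∀ j : Nat, p (f + 5 * ((j : Int) + 1)) = false) :
    ∀ k : Nat, (PySem.List.pyRange (f + 5 * (k : Int)) (-1) (-5)).find? p = some f := by
  intro k
  induction k with
  | zero =>
    rw [show f + 5 * ((0 : Nat) : Int) = f by norm_num, down5_cons f hf]
    simp [List.find?, hpf]
  | succ m ih =>
    have hcast : f + 5 * ((m + 1 : Nat) : Int) = f + 5 * ((m : Int) + 1) := by push_cast; ring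
    have h0 : (0 : Int) ≤ f + 5 * ((m : Int) + 1) := by
      have : (0 : Int) ≤ (m : Int) := Int.natCast_nonneg m
      omega
    rw [hcast, down5_cons _ h0]
    simp only [List.find?, hup m]
    rw [show f + 5 * ((m : Int) + 1) - 5 = f + 5 * ((m : Nat) : Int) from by omega, ih]

-- ===== VERDICT (by name: the statement is the Claim_ definition above) =====
theorem numberGrid_spec : Claim_equal_numberGrid := by
  intro n _ hn
  unfold Spec_numberGrid
  rw [alt_eq]
  set f := 3 * n - pvT (n % 15) with hfdef
  have h15 : n % 15 = 0 ∨ n % 15 = 1 ∨ n % 15 = 2 ∨ n % 15 = 3 ∨ n % 15 = 4 ∨ n % 15 = 5 ∨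
      n % 15 = 6 ∨ n % 15 = 7 ∨ n % 15 = 8 ∨ n % 15 = 9 ∨ n % 15 = 10 ∨ n % 15 = 11 ∨
      n % 15 = 12 ∨ n % 15 = 13 ∨ n % 15 = 14 := by omega
  have hn0 : (0 : Int) ≤ n := hn
  have hfacts : 0 ≤ f ∧ f % 5 = 0 ∧ f ≤ PySem.Int.floordiv (3 * n) 5 * 5 ∧
      5 ∣ (PySem.Int.floordiv (3 * n) 5 * 5 - f) := by
    have hfl : PySem.Int.floordiv (3 * n) 5 = (3 * n) / 5 :=
      PySem.Int.floordiv_eq_ediv_of_pos (by norm_num)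
    rw [hfl, hfdef]
    rcases h15 with h | h | h | h | h | h | h | h | h | h | h | h | h | h | h
    · have hT : pvT (n % 15) = 0 := by rw [h]; norm_num [pvT]
      rw [hT]
      exact ⟨by omega, by omega, by omega, by omega⟩
    · have hT : pvT (n % 15) = 3 := by rw [h]; norm_num [pvT]
      rw [hT]
      exact ⟨by omega, by omega, by omega, by omega⟩
    · have hT : pvT (n % 15) = 1 := by rw [h]; norm_num [pvT]
      rw [hT]
      exact ⟨by omega, by omega, by omega, by omega⟩
    · have hT : pvT (n % 15) = 4 := by rw [h]; norm_num [pvT]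
      rw [hT]
      exact ⟨by omega, by omega, by omega, by omega⟩
    · have hT : pvT (n % 15) = 2 := by rw [h]; norm_num [pvT]
      rw [hT]
      exact ⟨by omega, by omega, by omega, by omega⟩
    · have hT : pvT (n % 15) = 5 := by rw [h]; norm_num [pvT]
      rw [hT]
      exact ⟨by omega, by omega, by omega, by omega⟩
    · have hT : pvT (n % 15) = 3 := by rw [h]; norm_num [pvT]
      rw [hT]
      exact ⟨by omega, by omega, by omega, by omega⟩
    · have hT : pvT (n % 15) = 6 := by rw [h]; norm_num [pvT]
      rw [hT]
      exact ⟨by omega, by omega, by omega, by omega⟩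
    · have hT : pvT (n % 15) = 4 := by rw [h]; norm_num [pvT]
      rw [hT]
      exact ⟨by omega, by omega, by omega, by omega⟩
    · have hT : pvT (n % 15) = 2 := by rw [h]; norm_num [pvT]
      rw [hT]
      exact ⟨by omega, by omega, by omega, by omega⟩
    · have hT : pvT (n % 15) = 5 := by rw [h]; norm_num [pvT]
      rw [hT]
      exact ⟨by omega, by omega, by omega, by omega⟩
    · have hT : pvT (n % 15) = 3 := by rw [h]; norm_num [pvT]
      rw [hT]
      exact ⟨by omega, by omega, by omega, by omega⟩
    · have hT : pvT (n % 15) = 6 := by rw [h]; norm_num [pvT]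
      rw [hT]
      exact ⟨by omega, by omega, by omega, by omega⟩
    · have hT : pvT (n % 15) = 4 := by rw [h]; norm_num [pvT]
      rw [hT]
      exact ⟨by omega, by omega, by omega, by omega⟩
    · have hT : pvT (n % 15) = 2 := by rw [h]; norm_num [pvT]
      rw [hT]
      exact ⟨by omega, by omega, by omega, by omega⟩
  obtain ⟨hf0, hf5, hfle, hdvd⟩ := hfacts
  obtain ⟨k, hk⟩ : ∃ k : Nat, PySem.Int.floordiv (3 * n) 5 * 5 = f + 5 * (k : Int) := by
    obtain ⟨c, hc⟩ := hdvd
    refine ⟨c.toNat, ?_⟩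
    have : 0 ≤ c := by omega
    omega
  have hup : ∀ j : Nat, pvInner n (f + 5 * ((j : Int) + 1)) = false := by
    intro j
    by_contra hcon
    have htrue : pvInner n (f + 5 * ((j : Int) + 1)) = true := by
      revert hcon; cases h : pvInner n (f + 5 * ((j : Int) + 1)) <;> simp
    have hjn : (0 : Int) ≤ (j : Int) := Int.natCast_nonneg j
    have hle := inner_fwd n (f + 5 * ((j : Int) + 1)) hn0 (by omega) htrue
    rw [← hfdef] at hle
    omega
  have hng : numberGrid n =
      (match (PySem.List.pyRange (PySem.Int.floordiv (3 * n) 5 * 5) (-1) (-5)).find?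
          (fun t => pvInner n t) with
       | some t => t
       | none => 0) := rfl
  rw [hng, hk, find_down (fun t => pvInner n t) f hf0 (inner_at n hn0) hup k]
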